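-- pv_equiv track=rewrite | github.com/AJOUIRJAayoub/2ALGO | 2ALGO .py | somme_max_bottom_up
-- ===== SOURCE A (Python) =====
-- def somme_max_bottom_up(T, C, A, B):
--     # Cette fonction utilise une approche dynamique "Bottom Up" pour calculer la somme maximale collectée lors du parcours,
--     # en tenant compte des coefficients A et B, ainsi que des catégories associées à chaque valeur.
--
--     n = len(T)  # Détermine la longueur de la liste T.
--     if n == 0:  # Vérifie si la liste T est vide.
--         return 0, []  # Si la liste T est vide, retourne 0 comme somme maximale et une liste vide pour les indices visités.
--
--     # Initialisation des tableaux pour stocker les résultats intermédiaires et les indices des emplacements visités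
--     dp = [0] * (n + 1)  # Tableau pour stocker les résultats intermédiaires du calcul de la somme maximale.
--     trace = [None] * n  # Tableau pour enregistrer les indices des emplacements visités.
--
--     for i in range(n - 1, -1, -1):
--         # Parcours de la liste T en partant de la fin pour calculer la somme maximale pour chaque emplacement.
--
--         # Calcul de la somme maximale pour l'emplacement i en utilisant la formule dynamique "Bottom Up"
--         dp[i] = max(dp[i + 1], (B if i == n - 1 or C[i] != C[i + 1] else A) * T[i] + dp[i + 1])
--
--         # Mise à jour de l'indice visité dans le tableau trace
--         if i == n - 1 or C[i] != C[i + 1]:  # Vérifie si l'élément actuel est le dernier ou s'il a un symbole différent du suivant.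
--             trace[i] = i
--         else:
--             trace[i] = trace[i + 1]
--
--     # Reconstruction du chemin
--     vrai_chemin = []  # Liste pour enregistrer les indices des emplacements visités dans l'ordre.
--     i = 0
--     while i < n and trace[i] is not None:
--         vrai_chemin.append(i)  # Ajoute l'indice de l'emplacement visité à vrai_chemin.
--         i += 1 if trace[i] == i else trace[i] - i  # Déplace l'indice à l'emplacement suivant du chemin.
--
--     return dp[0], vrai_chemin  # Retourne la somme maximale et la liste des indices des emplacements visités.
-- ===== SOURCE B (Python) =====
-- def somme_max_bottom_up(T, C, A, B):
--     # Single forward pass: the dp collapses to total += max(0, coef*T[i]);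
--     # the path is the start (and end, when longer than one) of each maximal
--     # run of equal categories. No dp/trace arrays.
--     n = len(T)
--     if n == 0:
--         return 0, []
--     total = 0
--     path = []
--     start = 0
--     for i in range(n):
--         boundary = i == n - 1 or C[i] != C[i + 1]
--         v = (B if boundary else A) * T[i]
--         if v > 0:
--             total += v
--         if boundary:
--             path.append(start)
--             if i > start:
--                 path.append(i)
--             start = i + 1
--     return total, path
-- ===== Notes on version B (the rewrite author's own statement) =====
-- stated objective: simpler
-- what changed: Replaced the dp/trace arrays and the pointer-jumping path reconstruction by a single forward pass: the dp recurrence collapses to total += max(0, coef*T[i]), and the path is the start (plus end when longer than one) of each maximal run of equal categories.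
import Mathlib
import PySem

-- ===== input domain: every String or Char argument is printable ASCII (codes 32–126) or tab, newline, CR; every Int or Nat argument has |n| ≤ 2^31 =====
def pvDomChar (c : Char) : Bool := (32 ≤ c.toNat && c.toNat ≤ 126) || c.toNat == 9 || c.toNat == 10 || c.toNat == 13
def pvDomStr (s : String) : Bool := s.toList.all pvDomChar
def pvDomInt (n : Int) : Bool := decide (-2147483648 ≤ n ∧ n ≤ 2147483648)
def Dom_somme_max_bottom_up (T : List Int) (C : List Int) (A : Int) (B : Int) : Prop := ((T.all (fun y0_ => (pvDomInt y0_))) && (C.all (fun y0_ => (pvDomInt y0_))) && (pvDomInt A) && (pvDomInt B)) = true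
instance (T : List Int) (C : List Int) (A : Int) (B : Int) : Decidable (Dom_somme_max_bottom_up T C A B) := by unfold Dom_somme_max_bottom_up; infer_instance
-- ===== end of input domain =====

-- B replaces A's dp/trace arrays and pointer-jumping path reconstruction by one
-- forward pass with a scalar accumulator and a run-start marker (objective: simpler).

-- ===== PORT A =====
-- body of A's "for i in range(n-1, -1, -1)" loop: update dp[i] and trace[i]
def aStep (T : List Int) (C : List Int) (A : Int) (B : Int) (n : Nat)
    (s : List Int × List (Option Int)) (i : Int) : List Int × List (Option Int) :=
  let bd : Bool := (i == (n : Int) - 1) || (PySem.List.pyGetD C i 0 != PySem.List.pyGetD C (i + 1) 0)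
  let dp := PySem.List.pySetD s.1 i (max (PySem.List.pyGetD s.1 (i + 1) 0)
              ((if bd then B else A) * PySem.List.pyGetD T i 0 + PySem.List.pyGetD s.1 (i + 1) 0))
  let tr := PySem.List.pySetD s.2 i (if bd then some i else PySem.List.pyGetD s.2 (i + 1) none)
  (dp, tr)

-- A's "while i < n and trace[i] is not None" reconstruction; fuel = n+1 bounds the
-- iteration count (i strictly increases, so Python performs at most n+1 checks)
def pvWalk (tr : List (Option Int)) (n : Nat) : Nat → Int → List Int → List Int
  | 0, _, acc => acc
  | fuel + 1, i, acc =>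
    if i < (n : Int) then
      match PySem.List.pyGetD tr i none with
      | none => acc
      | some t => pvWalk tr n fuel (if t == i then i + 1 else t) (acc ++ [i])
    else acc

def somme_max_bottom_up (T : List Int) (C : List Int) (A : Int) (B : Int) : Int × List Int :=
  let n := T.length
  if n = 0 then (0, [])
  else
    let fin := (PySem.List.pyRange ((n : Int) - 1) (-1) (-1)).foldl (aStep T C A B n)
                 (List.replicate (n + 1) 0, List.replicate n none)
    (PySem.List.pyGetD fin.1 0 0, pvWalk fin.2 n (n + 1) 0 [])

-- ===== PORT B =====
-- body of B's single forward loop: state = (total, path, start of current run)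
def bStep (T : List Int) (C : List Int) (A : Int) (B : Int) (n : Nat)
    (s : Int × List Int × Int) (i : Int) : Int × List Int × Int :=
  let bd : Bool := (i == (n : Int) - 1) || (PySem.List.pyGetD C i 0 != PySem.List.pyGetD C (i + 1) 0)
  let v := (if bd then B else A) * PySem.List.pyGetD T i 0
  let total := if v > 0 then s.1 + v else s.1
  if bd then (total, s.2.1 ++ [s.2.2] ++ (if s.2.2 < i then [i] else []), i + 1)
  else (total, s.2.1, s.2.2)

def somme_max_bottom_up_alt (T : List Int) (C : List Int) (A : Int) (B : Int) : Int × List Int :=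
  let n := T.length
  if n = 0 then (0, [])
  else
    let fin := (PySem.List.pyRange 0 (n : Int) 1).foldl (bStep T C A B n) (0, [], 0)
    (fin.1, fin.2.1)

-- ===== PRECONDITION & SPEC =====
-- Pre_ excludes exactly the inputs on which the Python A raises IndexError
-- (C shorter than T while T has at least two elements); Python B raises there too.
def Pre_somme_max_bottom_up (T : List Int) (C : List Int) (A : Int) (B : Int) : Prop :=
  T.length ≤ 1 ∨ T.length ≤ C.length
instance (T : List Int) (C : List Int) (A : Int) (B : Int) : Decidable (Pre_somme_max_bottom_up T C A B) := by unfold Pre_somme_max_bottom_up; infer_instance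
def pvWitness_somme_max_bottom_up : List Int × List Int × Int × Int := ([3, -1, 2], [0, 0, 1], 2, 5)

def Spec_somme_max_bottom_up (T : List Int) (C : List Int) (A : Int) (B : Int) (out : Int × List Int) : Prop := out = somme_max_bottom_up_alt T C A B
instance (T : List Int) (C : List Int) (A : Int) (B : Int) (out : Int × List Int) : Decidable (Spec_somme_max_bottom_up T C A B out) := by unfold Spec_somme_max_bottom_up; infer_instance

-- ===== CLAIM (what is proved, stated in full; the proofs are below) =====
def Claim_equal_somme_max_bottom_up : Prop := ∀ (T : List Int) (C : List Int) (A : Int) (B : Int), Dom_somme_max_bottom_up T C A B → Pre_somme_max_bottom_up T C A B → Spec_somme_max_bottom_up T C A B (somme_max_bottom_up T C A B)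

-- ===== LEMMAS AND PROOFS =====

-- Nat-indexed form of the boundary test shared by both loop bodies
def bdN (n : Nat) (C : List Int) (j : Nat) : Bool :=
  (j == n - 1) || !(C.getD j 0 == C.getD (j + 1) 0)

-- suffix sum Σ_{i=j}^{n-1} max 0 (coef_i · T[i]) — the collapsed dp value
def mval (T C : List Int) (A B : Int) (n j : Nat) : Int :=
  max 0 ((if bdN n C j then B else A) * T.getD j 0)

def Ssum (T C : List Int) (A B : Int) (n : Nat) (j : Nat) : Int :=
  if _h : j < n then mval T C A B n j + Ssum T C A B n (j + 1) else 0
termination_by n - j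

theorem Ssum_pos (T C : List Int) (A B : Int) (n j : Nat) (h : j < n) :
    Ssum T C A B n j = mval T C A B n j + Ssum T C A B n (j + 1) := by
  rw [Ssum, dif_pos h]

-- index of the last element of the maximal equal-category run containing j
def runEnd (n : Nat) (C : List Int) (j : Nat) : Nat :=
  if _h : j + 1 < n then (if bdN n C j then j else runEnd n C (j + 1)) else j
termination_by n - j

theorem le_runEnd (n : Nat) (C : List Int) (j : Nat) : j ≤ runEnd n C j := by
  rw [runEnd]
  split_ifs with h1 h2
  · exact le_refl j
  · exact le_trans (Nat.le_succ j) (le_runEnd n C (j + 1))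
  · exact le_refl j
termination_by n - j

theorem runEnd_lt (n : Nat) (C : List Int) (j : Nat) (hj : j < n) : runEnd n C j < n := by
  rw [runEnd]
  split_ifs with h1 h2
  · exact hj
  · exact runEnd_lt n C (j + 1) h1
  · exact hj
termination_by n - j

theorem bdN_runEnd (n : Nat) (C : List Int) (j : Nat) (hj : j < n) :
    bdN n C (runEnd n C j) = true := by
  rw [runEnd]
  split_ifs with h1 h2
  · exact h2
  · exact bdN_runEnd n C (j + 1) h1
  · -- j + 1 ≥ n and j < n, so j = n - 1
    simp [bdN]
    omega
termination_by n - j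

theorem runEnd_eq_of_bd (n : Nat) (C : List Int) (j : Nat) (hb : bdN n C j = true) :
    runEnd n C j = j := by
  rw [runEnd]
  split_ifs with h1
  · rfl
  · rfl

theorem runEnd_idem (n : Nat) (C : List Int) (j : Nat) (hj : j < n) :
    runEnd n C (runEnd n C j) = runEnd n C j :=
  runEnd_eq_of_bd n C _ (bdN_runEnd n C j hj)

theorem runEnd_succ (n : Nat) (C : List Int) (j : Nat) (hj : j + 1 < n) (hb : bdN n C j = false) :
    runEnd n C j = runEnd n C (j + 1) := by
  rw [runEnd]; simp [hj, hb]

-- the path A's walk produces, described run by run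
def pathFrom (n : Nat) (C : List Int) (j : Nat) : List Int :=
  if _h : j < n then
    ((j : Int)) :: ((if runEnd n C j = j then [] else [((runEnd n C j : Nat) : Int)]) ++
      pathFrom n C (runEnd n C j + 1))
  else []
termination_by n - j
decreasing_by have := le_runEnd n C j; omega

-- the path B's forward scan produces (s = start of the current run)
def pathFromWith (n : Nat) (C : List Int) (j s : Nat) : List Int :=
  if _h : j < n then
    (if bdN n C j then
      ((s : Int)) :: ((if s < j then [(j : Int)] else []) ++ pathFromWith n C (j + 1) (j + 1))
    else pathFromWith n C (j + 1) s)
  else []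
termination_by n - j

theorem bridgeAux (n : Nat) (C : List Int) (j s : Nat) (hs : s ≤ j) (hj : j < n)
    (hni : ∀ i, s ≤ i → i < j → bdN n C i = false) :
    pathFromWith n C j s =
      (s : Int) :: ((if runEnd n C j = s then [] else [((runEnd n C j : Nat) : Int)]) ++
        pathFrom n C (runEnd n C j + 1)) := by
  rw [pathFromWith]
  by_cases hb : bdN n C j = true
  · have he : runEnd n C j = j := runEnd_eq_of_bd n C j hb
    have htail : pathFromWith n C (j + 1) (j + 1) = pathFrom n C (j + 1) := by
      by_cases hj1 : j + 1 < n
      · rw [bridgeAux n C (j + 1) (j + 1) (le_refl _) hj1 (by omega)]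
        conv_rhs => rw [pathFrom]
        simp [hj1]
      · rw [pathFromWith, pathFrom]; simp [hj1]
    rw [he]
    by_cases hsj : s = j
    · subst hsj; simp [hj, hb, htail]
    · have hlt : s < j := lt_of_le_of_ne hs hsj
      have hjs : ¬ (j = s) := by omega
      simp [hj, hb, htail, hlt, hjs]
  · have hb' : bdN n C j = false := by simpa using hb
    have hjne : j ≠ n - 1 := by
      intro h; rw [bdN] at hb'; simp [h] at hb'
    have hj1 : j + 1 < n := by omega
    have hre : runEnd n C j = runEnd n C (j + 1) := runEnd_succ n C j hj1 hb'
    have hni' : ∀ i, s ≤ i → i < j + 1 → bdN n C i = false := by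
      intro i hi1 hi2
      rcases Nat.lt_or_ge i j with h | h
      · exact hni i hi1 h
      · have : i = j := by omega
        subst this; exact hb'
    simp only [hj, dif_pos, hb', Bool.false_eq_true, if_false]
    rw [bridgeAux n C (j + 1) s (by omega) hj1 hni', hre]
termination_by n - j

theorem bridge (n : Nat) (C : List Int) (j : Nat) :
    pathFromWith n C j j = pathFrom n C j := by
  by_cases hj : j < n
  · rw [bridgeAux n C j j (le_refl _) hj (by omega)]
    conv_rhs => rw [pathFrom]
    simp [hj]
  · rw [pathFromWith, pathFrom]; simp [hj]

-- the Int boundary expression of the ports equals bdN on Nat indices below n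
theorem bd_cast (n : Nat) (C : List Int) (j : Nat) (hj : j < n) :
    (((j : Int) == (n : Int) - 1) || (C.getD j 0 != C.getD (j + 1) 0)) = bdN n C j := by
  have h2 : ((j : Int) == (n : Int) - 1) = (j == n - 1) := by
    by_cases h : j = n - 1
    · simp [h]; omega
    · have hne : ¬ ((j : Int) = (n : Int) - 1) := by omega
      simp [h, hne]
  rw [h2, bdN]
  rfl

-- two shapes of Python's max against an accumulator
theorem max_add_right (S x : Int) : max S (x + S) = max 0 x + S := by omega

theorem if_pos_add (t x : Int) : (if x > 0 then t + x else t) = t + max 0 x := by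
  split_ifs with h <;> omega

-- getD after set
theorem getD_set_eq {α : Type} [Inhabited α] (xs : List α) (i j : Nat) (v d : α) :
    (xs.set i v).getD j d = if j = i ∧ i < xs.length then v else xs.getD j d := by
  simp [List.getD, List.getElem?_set]
  split_ifs with h1 h2 h3 <;> simp_all

-- one step of A's loop preserves the dp/trace characterisation
theorem aStep_inv (T C : List Int) (A B : Int) (n k : Nat) (hk : k < n)
    (dp : List Int) (tr : List (Option Int))
    (hdl : dp.length = n + 1) (htl : tr.length = n)
    (hdp : ∀ j, j ≤ n → dp.getD j 0 = if k + 1 ≤ j then Ssum T C A B n j else 0)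
    (htr : ∀ j, j < n → tr.getD j none = if k + 1 ≤ j then some ((runEnd n C j : Nat) : Int) else none) :
    (aStep T C A B n (dp, tr) (k : Int)).1.length = n + 1 ∧
    (aStep T C A B n (dp, tr) (k : Int)).2.length = n ∧
    (∀ j, j ≤ n → (aStep T C A B n (dp, tr) (k : Int)).1.getD j 0 =
        if k ≤ j then Ssum T C A B n j else 0) ∧
    (∀ j, j < n → (aStep T C A B n (dp, tr) (k : Int)).2.getD j none =
        if k ≤ j then some ((runEnd n C j : Nat) : Int) else none) := by
  have hcast : ((k : Int) + 1) = (((k + 1 : Nat)) : Int) := by push_cast; ring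
  have hdp1 : dp.getD (k + 1) 0 = Ssum T C A B n (k + 1) := by
    rw [hdp (k + 1) (by omega)]; simp
  simp only [aStep, hcast, PySem.List.pySetD_natCast, PySem.List.pyGetD_natCast,
    bd_cast n C k hk]
  refine ⟨by simp [hdl], by simp [htl], ?_, ?_⟩
  · intro j hj
    rw [getD_set_eq, hdp1]
    by_cases hjk : j = k
    · subst hjk
      rw [if_pos ⟨rfl, by omega⟩, if_pos (le_refl j), max_add_right, Ssum_pos T C A B n j hk]
      rfl
    · rw [if_neg (by simp [hjk]), hdp j hj,
        if_congr (show (k + 1 ≤ j) ↔ (k ≤ j) by omega) rfl rfl]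
  · intro j hj
    rw [getD_set_eq]
    by_cases hjk : j = k
    · subst hjk
      rw [if_pos ⟨rfl, by omega⟩, if_pos (le_refl j)]
      by_cases hb : bdN n C j = true
      · rw [if_pos hb, runEnd_eq_of_bd n C j hb]
      · have hb' : bdN n C j = false := by simpa using hb
        have hjne : j ≠ n - 1 := by intro h; rw [bdN] at hb'; simp [h] at hb'
        have hj1 : j + 1 < n := by omega
        rw [if_neg hb, htr (j + 1) hj1, if_pos (by omega), runEnd_succ n C j hj1 hb']
    · rw [if_neg (by simp [hjk]), htr j hj,
        if_congr (show (k + 1 ≤ j) ↔ (k ≤ j) by omega) rfl rfl]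

-- folding A's loop from index k down to 0 yields the full characterisation
theorem aFold_inv (T C : List Int) (A B : Int) (n : Nat) :
    ∀ k, k < n → ∀ (dp : List Int) (tr : List (Option Int)),
    dp.length = n + 1 → tr.length = n →
    (∀ j, j ≤ n → dp.getD j 0 = if k + 1 ≤ j then Ssum T C A B n j else 0) →
    (∀ j, j < n → tr.getD j none = if k + 1 ≤ j then some ((runEnd n C j : Nat) : Int) else none) →
    (∀ j, j ≤ n → ((PySem.List.pyRange (k : Int) (-1) (-1)).foldl (aStep T C A B n) (dp, tr)).1.getD j 0 =
        Ssum T C A B n j) ∧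
    (∀ j, j < n → ((PySem.List.pyRange (k : Int) (-1) (-1)).foldl (aStep T C A B n) (dp, tr)).2.getD j none =
        some ((runEnd n C j : Nat) : Int)) := by
  intro k
  induction k with
  | zero =>
    intro hk dp tr hdl htl hdp htr
    rw [PySem.List.pyRange_neg_one_cons (by omega)]
    have h := aStep_inv T C A B n 0 hk dp tr hdl htl hdp htr
    have hnil : PySem.List.pyRange (((0 : Nat) : Int) - 1) (-1) (-1) = [] :=
      PySem.List.pyRange_neg_one_eq_nil (by omega)
    rw [List.foldl_cons, hnil, List.foldl_nil]
    exact ⟨fun j hj => by rw [h.2.2.1 j hj]; simp,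
           fun j hj => by rw [h.2.2.2 j hj]; simp⟩
  | succ k ih =>
    intro hk dp tr hdl htl hdp htr
    rw [PySem.List.pyRange_neg_one_cons (by omega)]
    have h := aStep_inv T C A B n (k + 1) hk dp tr hdl htl hdp htr
    have hc : ((k + 1 : Nat) : Int) - 1 = (k : Int) := by push_cast; ring
    rw [List.foldl_cons, hc]
    exact ih (by omega) _ _ h.1 h.2.1 h.2.2.1 h.2.2.2

-- single-step reductions of A's walk
theorem pvWalk_succ_some (tr : List (Option Int)) (n fuel : Nat) (i t : Int) (acc : List Int)
    (hi : i < (n : Int)) (h : PySem.List.pyGetD tr i none = some t) :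
    pvWalk tr n (fuel + 1) i acc =
      pvWalk tr n fuel (if t == i then i + 1 else t) (acc ++ [i]) := by
  rw [pvWalk, if_pos hi, h]

theorem pvWalk_stop (tr : List (Option Int)) (n fuel : Nat) (i : Int) (acc : List Int)
    (hi : ¬ i < (n : Int)) :
    pvWalk tr n (fuel + 1) i acc = acc := by
  rw [pvWalk, if_neg hi]

-- A's walk over the finished trace produces the run-by-run path
theorem walk_spec (n : Nat) (C : List Int) (tr : List (Option Int))
    (htr : ∀ j, j < n → tr.getD j none = some ((runEnd n C j : Nat) : Int)) :
    ∀ (fuel : Nat) (i : Nat) (acc : List Int), n + 1 - i ≤ fuel →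
    pvWalk tr n fuel (i : Int) acc = acc ++ pathFrom n C i := by
  intro fuel
  induction fuel with
  | zero =>
    intro i acc hf
    have hi : ¬ i < n := by omega
    rw [pvWalk, pathFrom]
    simp [hi]
  | succ fuel ih =>
    intro i acc hf
    by_cases hi : i < n
    · have hilt : (i : Int) < (n : Int) := by exact_mod_cast hi
      have hsome : PySem.List.pyGetD tr ((i : Nat) : Int) none =
          some ((runEnd n C i : Nat) : Int) := by
        rw [PySem.List.pyGetD_natCast]; exact htr i hi
      rw [pvWalk_succ_some tr n fuel _ _ acc hilt hsome]
      by_cases he : runEnd n C i = i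
      · rw [if_pos (by simp [he])]
        have h1 : ((i : Int) + 1) = (((i + 1 : Nat)) : Int) := by push_cast; ring
        rw [h1, ih (i + 1) (acc ++ [(i : Int)]) (by omega)]
        conv_rhs => rw [pathFrom]
        simp [hi, he]
      · rw [if_neg (by simp [he])]
        have hgt : i + 1 ≤ runEnd n C i := by
          have := le_runEnd n C i; omega
        rw [ih (runEnd n C i) (acc ++ [(i : Int)]) (by omega)]
        have hrlt : runEnd n C i < n := runEnd_lt n C i hi
        have hpe : pathFrom n C (runEnd n C i) =
            ((runEnd n C i : Nat) : Int) :: pathFrom n C (runEnd n C i + 1) := by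
          rw [pathFrom, dif_pos hrlt, runEnd_idem n C i hi]
          simp
        have hfi : pathFrom n C i =
            (i : Int) :: ((runEnd n C i : Nat) : Int) :: pathFrom n C (runEnd n C i + 1) := by
          rw [pathFrom, dif_pos hi]
          simp [he]
        rw [hpe, hfi]
        simp
    · have hilt : ¬ (i : Int) < (n : Int) := by exact_mod_cast hi
      rw [pvWalk_stop tr n fuel _ acc hilt, pathFrom]
      simp [hi]

-- B's forward fold from index j computes the suffix sum and the remaining path
theorem bFold (T C : List Int) (A B : Int) (n : Nat) :
    ∀ (fuel j : Nat), n - j ≤ fuel → j ≤ n → ∀ (t : Int) (p : List Int) (s : Nat),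
    ((PySem.List.pyRange (j : Int) (n : Int) 1).foldl (bStep T C A B n) (t, p, (s : Int))).1 =
      t + Ssum T C A B n j ∧
    ((PySem.List.pyRange (j : Int) (n : Int) 1).foldl (bStep T C A B n) (t, p, (s : Int))).2.1 =
      p ++ pathFromWith n C j s := by
  intro fuel
  induction fuel with
  | zero =>
    intro j hf hj t p s
    have hjn : j = n := by omega
    subst hjn
    rw [PySem.List.pyRange_one_eq_nil (le_refl _), Ssum, pathFromWith]
    simp
  | succ fuel ih =>
    intro j hf hj t p s
    by_cases hjn : j < n
    · have hlt : (j : Int) < (n : Int) := by exact_mod_cast hjn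
      have h1 : ((j : Int) + 1) = (((j + 1 : Nat)) : Int) := by push_cast; ring
      rw [PySem.List.pyRange_one_cons hlt, List.foldl_cons, h1]
      have hstep : bStep T C A B n (t, p, (s : Int)) (j : Int) =
          (t + mval T C A B n j,
           if bdN n C j then
             (p ++ [(s : Int)] ++ (if s < j then [(j : Int)] else []), ((j + 1 : Nat) : Int))
           else (p, (s : Int))) := by
        simp only [bStep, h1, PySem.List.pyGetD_natCast, bd_cast n C j hjn]
        rw [if_pos_add]
        by_cases hb : bdN n C j = true
        · simp only [hb, if_true, mval, Nat.cast_lt]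
        · have hb' : bdN n C j = false := by simpa using hb
          simp only [hb', Bool.false_eq_true, if_false, mval]
      rw [hstep]
      by_cases hb : bdN n C j = true
      · rw [if_pos hb]
        have h := ih (j + 1) (by omega) (by omega)
          (t + mval T C A B n j)
          (p ++ [(s : Int)] ++ (if s < j then [(j : Int)] else [])) (j + 1)
        refine ⟨?_, ?_⟩
        · rw [h.1, Ssum_pos T C A B n j hjn]; ring
        · rw [h.2]
          conv_rhs => rw [pathFromWith]
          simp [hjn, hb]
      · have hb' : bdN n C j = false := by simpa using hb
        rw [if_neg hb]
        have h := ih (j + 1) (by omega) (by omega) (t + mval T C A B n j) p s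
        refine ⟨?_, ?_⟩
        · rw [h.1, Ssum_pos T C A B n j hjn]; ring
        · rw [h.2]
          conv_rhs => rw [pathFromWith]
          simp [hjn, hb']
    · have hjn' : j = n := by omega
      subst hjn'
      rw [PySem.List.pyRange_one_eq_nil (le_refl _), Ssum, pathFromWith]
      simp

-- ===== VERDICT (by name: the statement is the Claim_ definition above) =====
theorem somme_max_bottom_up_spec : Claim_equal_somme_max_bottom_up := by
  intro T C A B _hdom _hpre
  unfold Spec_somme_max_bottom_up somme_max_bottom_up somme_max_bottom_up_alt
  by_cases hn : T.length = 0
  · simp [hn]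
  · simp only [hn, if_false]
    set n := T.length with hndef
    have hn1 : 1 ≤ n := by omega
    have hcast : ((n : Int) - 1) = (((n - 1 : Nat)) : Int) := by push_cast [hn1]; ring
    have hinit := aFold_inv T C A B n (n - 1) (by omega)
      (List.replicate (n + 1) 0) (List.replicate n none)
      (by simp) (by simp)
      (by intro j hj
          have hz : (List.replicate (n + 1) (0 : Int)).getD j 0 = 0 := by simp [List.getD]
          rw [hz]
          by_cases h : n - 1 + 1 ≤ j
          · have hjn : j = n := by omega
            subst hjn
            rw [if_pos h, Ssum]
            simp
          · rw [if_neg h])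
      (by intro j hj
          have hz : (List.replicate n (none : Option Int)).getD j none = none := by
            simp [List.getD]
          rw [hz, if_neg (by omega)])
    rw [hcast]
    set fin := (PySem.List.pyRange (((n - 1 : Nat)) : Int) (-1) (-1)).foldl (aStep T C A B n)
      (List.replicate (n + 1) 0, List.replicate n none) with hfin
    have hB := bFold T C A B n n 0 (by omega) (by omega) 0 [] 0
    have hA1 : PySem.List.pyGetD fin.1 0 0 = Ssum T C A B n 0 := by
      rw [PySem.List.pyGetD_zero]
      exact hinit.1 0 (by omega)
    have hA2 : pvWalk fin.2 n (n + 1) 0 [] = pathFrom n C 0 := by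
      have h := walk_spec n C fin.2 hinit.2 (n + 1) 0 [] (by omega)
      simpa using h
    rw [hA1, hA2]
    have hB1 := hB.1
    have hB2 := hB.2
    simp only [Nat.cast_zero] at hB1 hB2
    rw [hB1, hB2, bridge n C 0]
    simp
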